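-- pv_equiv track=rewrite | github.com/pypi-data/pypi-mirror-401 | packages/Qwael/qwael-4.0.0.1.6-py3-none-any.whl/Qwael/MultiDB.py | _split_rules
-- ===== SOURCE A (Python) =====
-- def _split_rules(rule):
--     if not rule:
--         return []
--
--     rule = rule.replace(" ", "").replace("+", ",").replace("#-", ",#-")
--     rules = [r for r in rule.split(",") if r]
--
--     if len(rules) > 25:
--         raise ValueError("Bir sütun için maksimum 25 kural eklenebilir!")
--
--     return rules
-- ===== SOURCE B (Python) =====
-- def _split_rules(rule):
--     if not rule:
--         return []
--
--     s = [c for c in rule if c != ' ']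
--     tokens = []
--     buf = []
--     i = 0
--     n = len(s)
--     while i < n:
--         c = s[i]
--         if c == ',' or c == '+':
--             if buf:
--                 tokens.append(''.join(buf))
--             buf = []
--             i += 1
--         elif c == '#' and i + 1 < n and s[i + 1] == '-':
--             if buf:
--                 tokens.append(''.join(buf))
--             buf = ['#', '-']
--             i += 2
--         else:
--             buf.append(c)
--             i += 1
--     if buf:
--         tokens.append(''.join(buf))
--
--     if len(tokens) > 25:
--         raise ValueError("Bir sütun için maksimum 25 kural eklenebilir!")
--
--     return tokens
-- ===== Notes on version B (the rewrite author's own statement) =====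
-- stated objective: alternative
-- what changed: Replaced the three-pass replace-chain plus split-and-filter pipeline by a single buffer-based character scanner over the space-free characters that flushes the current token at each separator (comma or plus) and before each hash-minus pair.
import Mathlib
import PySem

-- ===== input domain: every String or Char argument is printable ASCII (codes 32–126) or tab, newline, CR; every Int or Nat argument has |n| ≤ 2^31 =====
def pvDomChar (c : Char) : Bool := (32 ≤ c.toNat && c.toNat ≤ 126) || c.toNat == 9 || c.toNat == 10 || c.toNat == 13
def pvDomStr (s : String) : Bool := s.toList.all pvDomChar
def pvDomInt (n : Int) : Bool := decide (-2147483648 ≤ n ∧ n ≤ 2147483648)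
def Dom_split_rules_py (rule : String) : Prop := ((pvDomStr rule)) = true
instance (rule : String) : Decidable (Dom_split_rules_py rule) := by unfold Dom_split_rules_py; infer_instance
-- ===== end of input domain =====

-- B replaces A's replace-chain + split + comprehension by a single-pass buffer scanner (objective: alternative, same cost).

-- ===== PORT A =====
-- literal port of A: replace " "→"", "+"→",", "#-"→",#-", split on ",", drop empties;
-- where Python raises ValueError (more than 25 rules, outside Pre_) the port returns [].
def split_rules_py (rule : String) : List String :=
  if rule == "" then []
  else
    let r := PySem.Str.replace (PySem.Str.replace (PySem.Str.replace rule " " "") "+" ",") "#-" ",#-"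
    let rules := ((PySem.Str.split? r ",").getD []).filter (fun s => s != "")
    if rules.length > 25 then [] else rules

-- ===== PORT B =====
-- B's while-loop: s the remaining space-free chars, buf the current token, toks the tokens emitted so far
def scanB : List Char → List Char → List String → List String
  | [], buf, toks => toks ++ (if buf.isEmpty then [] else [String.ofList buf])
  | c :: t, buf, toks =>
    if c == ',' || c == '+' then
      scanB t [] (toks ++ (if buf.isEmpty then [] else [String.ofList buf]))
    else if c == '#' && t.head? == some '-' then
      scanB t.tail ['#', '-'] (toks ++ (if buf.isEmpty then [] else [String.ofList buf]))
    else
      scanB t (buf ++ [c]) toks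
  termination_by l _ _ => l.length
  decreasing_by all_goals (simp [List.length_tail]; try omega)

def split_rules_py_alt (rule : String) : List String :=
  if rule == "" then []
  else
    let s := rule.toList.filter (fun c => c != ' ')
    let tokens := scanB s [] []
    if tokens.length > 25 then [] else tokens

-- ===== PRECONDITION & SPEC =====
-- spec-level description of the rule list the rule string denotes (used only by Pre_ and the proofs)
def plA (c : Char) : Char := if c = '+' then ',' else c

def pvIns : List Char → List Char
  | [] => []
  | [c] => [c]
  | c :: d :: t => if c = '#' ∧ d = '-' then ',' :: '#' :: '-' :: pvIns t else c :: pvIns (d :: t)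

def pvSplit : List Char → List Char → List (List Char)
  | [], cur => [cur]
  | c :: t, cur => if c = ',' then cur :: pvSplit t [] else pvSplit t (cur ++ [c])

def pvRules (rule : String) : List (List Char) :=
  (pvSplit (pvIns ((rule.toList.filter (fun c => c != ' ')).map plA)) []).filter (fun l => l ≠ [])

-- Pre_ excludes exactly the inputs on which A raises ValueError: rule strings listing more than 25 rules.
def Pre_split_rules_py (rule : String) : Prop := (pvRules rule).length ≤ 25
instance (rule : String) : Decidable (Pre_split_rules_py rule) := by unfold Pre_split_rules_py; infer_instance

def pvWitness_split_rules_py : String := "col > 3 + #-drop, name"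

def Spec_split_rules_py (rule : String) (out : List String) : Prop := out = split_rules_py_alt rule
instance (rule : String) (out : List String) : Decidable (Spec_split_rules_py rule out) := by unfold Spec_split_rules_py; infer_instance

-- ===== CLAIM (what is proved, stated in full; the proofs are below) =====
def Claim_equal_split_rules_py : Prop := ∀ (rule : String), Dom_split_rules_py rule → Pre_split_rules_py rule → Spec_split_rules_py rule (split_rules_py rule)

-- ===== LEMMAS AND PROOFS =====

theorem witness_ok : Dom_split_rules_py pvWitness_split_rules_py ∧ Pre_split_rules_py pvWitness_split_rules_py := by decide

theorem replace_go_single (a : Char) (new : List Char) :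
    ∀ fuel l acc, l.length ≤ fuel →
      PySem.Chars.replace.go [a] new fuel l acc
        = acc.reverse ++ l.flatMap (fun c => if c = a then new else [c]) := by
  intro fuel
  induction fuel with
  | zero =>
    intro l acc h
    have : l = [] := by cases l <;> simp_all
    subst this
    simp [PySem.Chars.replace.go]
  | succ n ih =>
    intro l acc h
    cases l with
    | nil => simp [PySem.Chars.replace.go]
    | cons c t =>
      rw [PySem.Chars.replace.go]
      by_cases hc : c = a
      · subst hc
        simp [List.isPrefixOf, ih t _ (by simpa using h)]
      · have : ([a].isPrefixOf (c :: t)) = false := by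
          simp [List.isPrefixOf]
          exact fun h' => hc h'.symm
        simp [this, hc, ih t _ (by simpa using h)]

theorem replace_single (s : List Char) (a : Char) (new : List Char) :
    PySem.Chars.replace s [a] new = s.flatMap (fun c => if c = a then new else [c]) := by
  simp [PySem.Chars.replace, replace_go_single a new s.length s []]

theorem flatMap_space (s : List Char) :
    s.flatMap (fun c => if c = ' ' then [] else [c]) = s.filter (fun c => c != ' ') := by
  induction s with
  | nil => rfl
  | cons c t ih => by_cases h : c = ' ' <;> simp [h, ih]

theorem flatMap_plus (s : List Char) :
    s.flatMap (fun c => if c = '+' then [','] else [c]) = s.map plA := by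
  induction s with
  | nil => rfl
  | cons c t ih => by_cases h : c = '+' <;> simp [h, ih, plA]

theorem replace_go_pair :
    ∀ fuel l acc, l.length ≤ fuel →
      PySem.Chars.replace.go ['#', '-'] [',', '#', '-'] fuel l acc = acc.reverse ++ pvIns l := by
  intro fuel
  induction fuel with
  | zero =>
    intro l acc h
    have : l = [] := by cases l <;> simp_all
    subst this
    simp [PySem.Chars.replace.go, pvIns]
  | succ n ih =>
    intro l acc h
    cases l with
    | nil => simp [PySem.Chars.replace.go, pvIns]
    | cons c t =>
      cases t with
      | nil =>
        rw [PySem.Chars.replace.go]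
        simp [List.isPrefixOf, pvIns, ih [] (c :: acc) (by simp)]
      | cons d u =>
        rw [PySem.Chars.replace.go]
        by_cases hc : c = '#' ∧ d = '-'
        · obtain ⟨rfl, rfl⟩ := hc
          simp [List.isPrefixOf, pvIns, ih u _ (by simp at h ⊢; omega)]
        · have hpre : (['#', '-'].isPrefixOf (c :: d :: u)) = false := by
            simp [List.isPrefixOf]
            intro h1 h2
            exact hc ⟨h1.symm, h2.symm⟩
          simp [hpre, pvIns, hc, ih (d :: u) _ (by simpa using h)]

theorem replace_pair (s : List Char) :
    PySem.Chars.replace s ['#', '-'] [',', '#', '-'] = pvIns s := by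
  simp [PySem.Chars.replace, replace_go_pair s.length s []]

theorem splitOn_go :
    ∀ fuel l cur acc, l.length ≤ fuel →
      PySem.Chars.splitOn.go [','] fuel l cur acc = acc.reverse ++ pvSplit l cur.reverse := by
  intro fuel
  induction fuel with
  | zero =>
    intro l cur acc h
    have : l = [] := by cases l <;> simp_all
    subst this
    simp [PySem.Chars.splitOn.go, pvSplit]
  | succ n ih =>
    intro l cur acc h
    cases l with
    | nil => simp [PySem.Chars.splitOn.go, pvSplit]
    | cons c t =>
      rw [PySem.Chars.splitOn.go]
      by_cases hc : c = ','
      · subst hc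
        simp [List.isPrefixOf, pvSplit, ih t [] _ (by simpa using h)]
      · have hpre : ([','].isPrefixOf (c :: t)) = false := by
          simp [List.isPrefixOf]
          exact fun h' => hc h'.symm
        simp [hpre, hc, pvSplit, ih t (c :: cur) _ (by simpa using h)]

theorem splitOn_comma (s : List Char) :
    PySem.Chars.splitOn s [','] = pvSplit s [] := by
  simp [PySem.Chars.splitOn, splitOn_go (s.length + 1) s [] [] (by omega)]

theorem pvIns_cons_ne (c : Char) (X : List Char) (h : c ≠ '#') :
    pvIns (c :: X) = c :: pvIns X := by
  cases X <;> simp [pvIns, h]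

theorem core (s buf : List Char) (toks : List String) :
    scanB s buf toks
      = toks ++ ((pvSplit (pvIns (s.map plA)) buf).filter (fun l => l ≠ [])).map String.ofList := by
  fun_induction scanB s buf toks with
  | case1 buf toks => cases buf <;> simp [pvSplit, pvIns, String.ofList]
  | case2 c t buf toks hsep ih =>
    have hc : c = ',' ∨ c = '+' := by
      rcases Bool.or_eq_true_iff.mp hsep with h | h
      · exact Or.inl (by simpa using h)
      · exact Or.inr (by simpa using h)
    have hpl : plA c = ',' := by rcases hc with h | h <;> simp [h, plA]
    simp only [dite_eq_ite] at ih
    rw [ih]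
    rw [List.map_cons, hpl, pvIns_cons_ne ',' _ (by decide)]
    cases buf <;> simp [pvSplit, String.ofList]
  | case3 c t buf toks hsep hpair ih =>
    have hc : c = '#' := by
      have := (Bool.and_eq_true_iff.mp hpair).1; simpa using this
    have ht : t.head? = some '-' := by
      have := (Bool.and_eq_true_iff.mp hpair).2; simpa using this
    subst hc
    obtain ⟨u, rfl⟩ : ∃ u, t = '-' :: u := by
      cases t with
      | nil => simp at ht
      | cons d u => simp at ht; exact ⟨u, by simp [ht]⟩
    simp only [dite_eq_ite] at ih
    rw [ih]
    rw [show (('#' :: '-' :: u).map plA) = '#' :: '-' :: u.map plA from by simp [plA]]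
    rw [show pvIns ('#' :: '-' :: u.map plA) = ',' :: '#' :: '-' :: pvIns (u.map plA) from by
      simp [pvIns]]
    cases buf <;> simp [pvSplit, String.ofList]
  | case4 c t buf toks hsep hpair ih =>
    have hcc : ¬ (c = ',') ∧ ¬ (c = '+') := by
      constructor <;> intro h <;> subst h <;> simp at hsep
    have hpl : plA c = c := by simp [plA, hcc.2]
    have hins : pvIns (c :: t.map plA) = c :: pvIns (t.map plA) := by
      by_cases hch : c = '#'
      · subst hch
        cases t with
        | nil => simp [pvIns]
        | cons d u =>
          have hd : d ≠ '-' := by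
            intro h; subst h; simp at hpair
          have : plA d ≠ '-' := by
            by_cases h' : d = '+' <;> simp [plA, h', hd]
          simp [pvIns, this]
      · exact pvIns_cons_ne c _ hch
    rw [ih, List.map_cons, hpl, hins]
    simp [pvSplit, hcc.1]

theorem filter_map_ofList (L : List (List Char)) :
    (L.map String.ofList).filter (fun s => s != "") = (L.filter (fun l => l ≠ [])).map String.ofList := by
  induction L with
  | nil => rfl
  | cons x xs ih =>
    have hx : (String.ofList x != "") = decide (x ≠ []) := by
      by_cases h : x = [] <;> simp [h]
    simp [List.filter_cons, hx, ih]
    by_cases h : x = [] <;> simp [h]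

theorem rules_eq (rule : String) :
    ((PySem.Str.split? (PySem.Str.replace (PySem.Str.replace (PySem.Str.replace rule " " "") "+" ",") "#-" ",#-") ",").getD []).filter (fun s => s != "")
      = scanB (rule.toList.filter (fun c => c != ' ')) [] [] := by
  have hc1 : PySem.Chars.replace rule.toList [' '] [] = rule.toList.filter (fun c => c != ' ') := by
    rw [replace_single, flatMap_space]
  have hc2 : PySem.Chars.replace (rule.toList.filter (fun c => c != ' ')) ['+'] [',']
      = (rule.toList.filter (fun c => c != ' ')).map plA := by
    rw [replace_single, flatMap_plus]
  have h3 : (PySem.Str.replace (PySem.Str.replace (PySem.Str.replace rule " " "") "+" ",") "#-" ",#-").toList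
      = pvIns ((rule.toList.filter (fun c => c != ' ')).map plA) := by
    simp only [PySem.Str.replace, String.toList_ofList]
    rw [show (" " : String).toList = [' '] from rfl, show ("" : String).toList = ([] : List Char) from rfl,
        show ("+" : String).toList = ['+'] from rfl, show ("," : String).toList = [','] from rfl,
        show ("#-" : String).toList = ['#', '-'] from rfl, show (",#-" : String).toList = [',', '#', '-'] from rfl]
    rw [hc1, hc2, replace_pair]
  rw [core]
  simp only [PySem.Str.split?, PySem.Chars.split?]
  rw [show ("," : String).toList = [','] from rfl, h3]
  simp [splitOn_comma, filter_map_ofList]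

-- ===== VERDICT (by name: the statement is the Claim_ definition above) =====
theorem split_rules_py_spec : Claim_equal_split_rules_py := by
  intro rule _ _
  unfold Spec_split_rules_py split_rules_py split_rules_py_alt
  by_cases h : rule == ""
  · simp [h]
  · simp only [h, Bool.false_eq_true, if_false]
    rw [rules_eq]
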